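-- pv_equiv track=rewrite | github.com/JohnBrightGithub/PancakeSortingWorstStackNeuralNet | Common/DataLoader.py | getPrev
-- ===== SOURCE A (Python) =====
-- def getPrev(inputState):
--     #returns the previous state that created this state
--     #By fliping where the n occurs and flipping the n to the last position
--     state = inputState.copy()
--     action=-1
--     n=len(state)
--     for i in range(n):
--         if(state[i]==n):
--             action = i
--     state[0:action+1] = state[0:action+1][::-1]
--     action=n-1
--     state[0:action+1] = state[0:action+1][::-1]
--     return state[0:n-1]
-- ===== SOURCE B (Python) =====
-- def getPrev(inputState):
--     n = len(inputState)
--     p = 0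
--     for i, v in enumerate(inputState):
--         if v == n:
--             p = i
--     return inputState[p+1:][::-1] + inputState[:p]
-- ===== Notes on version B (the rewrite author's own statement) =====
-- stated objective: simpler
-- what changed: B finds the last index p of the value n in one enumerate pass and returns the previous state directly as reversed-suffix-plus-prefix (state[p+1:][::-1] + state[:p]), instead of A's two in-place prefix-reversal slice assignments followed by a trailing trim.
import Mathlib
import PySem

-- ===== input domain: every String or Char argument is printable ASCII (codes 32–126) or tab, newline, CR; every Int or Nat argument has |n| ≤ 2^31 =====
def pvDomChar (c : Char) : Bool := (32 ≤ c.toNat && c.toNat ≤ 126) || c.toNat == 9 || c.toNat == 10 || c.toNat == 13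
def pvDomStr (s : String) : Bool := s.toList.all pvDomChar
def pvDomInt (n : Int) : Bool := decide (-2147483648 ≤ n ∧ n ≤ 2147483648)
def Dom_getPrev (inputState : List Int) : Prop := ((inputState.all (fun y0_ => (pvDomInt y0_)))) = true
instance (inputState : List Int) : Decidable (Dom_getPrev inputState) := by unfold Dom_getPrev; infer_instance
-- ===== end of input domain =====

-- B computes the previous state directly as reversed-suffix ++ prefix instead of A's
-- two in-place prefix reversals followed by a trailing trim (objective: simpler).

-- ===== PORT A =====
def getPrev (inputState : List Int) : List Int :=
  -- state = inputState.copy(); n = len(state)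
  let state := inputState
  let n := state.length
  -- action = -1; for i in range(n): if state[i]==n: action = i
  let action : Int :=
    (PySem.List.pyRange 0 (n : Int)).foldl
      (fun a i => if PySem.List.pyGetD state i 0 = (n : Int) then i else a) (-1)
  -- state[0:action+1] = state[0:action+1][::-1]
  let state := (PySem.List.slice state (some 0) (some (action + 1))).reverse
                ++ PySem.List.slice state (some (action + 1)) none
  -- action = n-1; state[0:action+1] = state[0:action+1][::-1]
  let action : Int := (n : Int) - 1
  let state := (PySem.List.slice state (some 0) (some (action + 1))).reverse
                ++ PySem.List.slice state (some (action + 1)) none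
  -- return state[0:n-1]
  PySem.List.slice state (some 0) (some ((n : Int) - 1))

-- ===== PORT B =====
def getPrev_alt (inputState : List Int) : List Int :=
  let n := inputState.length
  -- p = 0; for i, v in enumerate(inputState): if v == n: p = i
  let p : Int :=
    (PySem.List.enumerate inputState 0).foldl
      (fun acc iv => if iv.2 = (n : Int) then iv.1 else acc) 0
  -- return inputState[p+1:][::-1] + inputState[:p]
  (PySem.List.slice inputState (some (p + 1)) none).reverse
    ++ PySem.List.slice inputState none (some p)

-- ===== PRECONDITION & SPEC =====
def Spec_getPrev (inputState : List Int) (out : List Int) : Prop := out = getPrev_alt inputState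
instance (inputState : List Int) (out : List Int) : Decidable (Spec_getPrev inputState out) := by unfold Spec_getPrev; infer_instance

-- ===== CLAIM (what is proved, stated in full; the proofs are below) =====
def Claim_equal_getPrev : Prop := ∀ (inputState : List Int), Dom_getPrev inputState → Spec_getPrev inputState (getPrev inputState)

-- ===== LEMMAS AND PROOFS =====

-- a last-match fold's result is its initial value or an element of the list
theorem pvFoldMem (c : Int → Prop) [DecidablePred c] (l : List Int) (a : Int) :
    l.foldl (fun acc i => if c i then i else acc) a = a ∨
    l.foldl (fun acc i => if c i then i else acc) a ∈ l := by
  induction l generalizing a with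
  | nil => exact Or.inl rfl
  | cons x l ih =>
    simp only [List.foldl_cons]
    rcases ih (if c x then x else a) with h | h
    · rw [h]; split_ifs with hc
      · exact Or.inr (List.mem_cons_self)
      · exact Or.inl rfl
    · exact Or.inr (List.mem_cons_of_mem _ h)

-- two last-match folds over the same list either agree or both kept their inits
theorem pvFoldInit (c : Int → Prop) [DecidablePred c] (l : List Int) (a b : Int) :
    l.foldl (fun acc i => if c i then i else acc) a =
      l.foldl (fun acc i => if c i then i else acc) b ∨
    (l.foldl (fun acc i => if c i then i else acc) a = a ∧
     l.foldl (fun acc i => if c i then i else acc) b = b) := by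
  induction l generalizing a b with
  | nil => exact Or.inr ⟨rfl, rfl⟩
  | cons x l ih =>
    simp only [List.foldl_cons]
    split_ifs with hc
    · exact Or.inl rfl
    · exact ih a b

theorem pvRevTake (l : List Int) : l.reverse.take (l.length - 1) = (l.drop 1).reverse := by
  cases l with
  | nil => simp
  | cons x l =>
    simp only [List.reverse_cons, List.drop_one, List.tail_cons]
    rw [List.take_append_of_le_length (by simp)]
    simp

theorem getPrev_spec' (s : List Int) : getPrev s = getPrev_alt s := by
  rcases eq_or_ne s [] with rfl | hne
  · decide
  · have hn : 1 ≤ s.length := List.length_pos_iff.mpr hne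
    unfold getPrev getPrev_alt
    simp only []
    have hB : List.foldl (fun (acc : Int) (iv : Int × Int) =>
          if iv.2 = ((s.length : Nat) : Int) then iv.1 else acc) 0 (PySem.List.enumerate s) =
        List.foldl (fun a i => if PySem.List.pyGetD s i 0 = ((s.length : Nat) : Int) then i else a)
          0 (PySem.List.pyRange 0 ((s.length : Nat) : Int)) := by
      rw [PySem.List.enumerate_eq_map_pyRange s 0, List.foldl_map]
      simp [PySem.List.len]
    rw [hB]
    have hmem : ∀ i ∈ PySem.List.pyRange 0 ((s.length : Nat) : Int),
        0 ≤ i ∧ i < ((s.length : Nat) : Int) := by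
      intro i hi
      have := (PySem.List.mem_pyRange_one).1 hi
      omega
    rcases pvFoldInit (fun i => PySem.List.pyGetD s i 0 = ((s.length : Nat) : Int))
        (PySem.List.pyRange 0 ((s.length : Nat) : Int)) (-1) 0 with heq | ⟨ha, hb⟩
    · -- found case: both folds return the last index where s[i] == n
      rw [← heq]
      have hr : 0 ≤ List.foldl (fun a i => if PySem.List.pyGetD s i 0 = ((s.length : Nat) : Int) then i else a)
            (-1) (PySem.List.pyRange 0 ((s.length : Nat) : Int)) ∧
          List.foldl (fun a i => if PySem.List.pyGetD s i 0 = ((s.length : Nat) : Int) then i else a)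
            (-1) (PySem.List.pyRange 0 ((s.length : Nat) : Int)) < ((s.length : Nat) : Int) := by
        rcases pvFoldMem (fun i => PySem.List.pyGetD s i 0 = ((s.length : Nat) : Int))
            (PySem.List.pyRange 0 ((s.length : Nat) : Int)) (-1) with h | h
        · rcases pvFoldMem (fun i => PySem.List.pyGetD s i 0 = ((s.length : Nat) : Int))
              (PySem.List.pyRange 0 ((s.length : Nat) : Int)) 0 with h0 | h0
          · omega
          · have := hmem _ h0; omega
        · exact hmem _ h
      obtain ⟨p, hp⟩ : ∃ p : Nat,
          List.foldl (fun a i => if PySem.List.pyGetD s i 0 = ((s.length : Nat) : Int) then i else a)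
            (-1) (PySem.List.pyRange 0 ((s.length : Nat) : Int)) = (p : Int) := by
        refine ⟨Int.toNat _, (Int.toNat_of_nonneg hr.1).symm⟩
      rw [hp] at hr ⊢
      have hpn : p + 1 ≤ s.length := by omega
      have h1 : (p : Int) + 1 = ((p + 1 : Nat) : Int) := by push_cast; ring
      rw [h1]
      simp only [PySem.List.slice_to_natCast, PySem.List.slice_from_natCast]
      have h2 : ((s.length : Nat) : Int) - 1 + 1 = ((s.length : Nat) : Int) := by ring
      rw [h2]
      simp only [PySem.List.slice_zero_start, PySem.List.slice_to_natCast,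
        PySem.List.slice_from_natCast]
      have e1 : List.take s.length ((List.take (p+1) s).reverse ++ List.drop (p+1) s)
          = (List.take (p+1) s).reverse ++ List.drop (p+1) s :=
        List.take_of_length_le (by simp; omega)
      have e2 : List.drop s.length ((List.take (p+1) s).reverse ++ List.drop (p+1) s)
          = [] := List.drop_eq_nil_of_le (by simp; omega)
      rw [e1, e2]
      have h3 : ((s.length : Nat) : Int) - 1 = ((s.length - 1 : Nat) : Int) := by omega
      rw [h3, PySem.List.slice_to_natCast]
      rw [List.append_nil, List.reverse_append, List.reverse_reverse]
      rw [List.take_append]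
      have e3 : List.take (s.length - 1) (List.drop (p+1) s).reverse
          = (List.drop (p+1) s).reverse := List.take_of_length_le (by simp; omega)
      have e4 : (List.drop (p+1) s).reverse.length = s.length - (p+1) := by simp
      rw [e3, e4]
      congr 1
      rw [List.take_take]
      congr 1
      omega
    · -- not-found case: A kept -1, B kept 0; both flips reduce to a plain reversal
      rw [ha, hb]
      norm_num
      simp only [PySem.List.slice_from_one]
      rw [show PySem.List.slice s none (some 0) = s.take 0 from
        PySem.List.slice_to s (le_refl 0)]
      simp only [List.take_zero, List.reverse_nil, List.nil_append]
      rw [List.take_length, List.drop_length, List.append_nil]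
      have h3 : ((s.length : Nat) : Int) - 1 = ((s.length - 1 : Nat) : Int) := by omega
      rw [h3, PySem.List.slice_to_natCast]
      rw [pvRevTake s]
      simp [List.drop_one]

-- ===== VERDICT (by name: the statement is the Claim_ definition above) =====
theorem getPrev_spec : Claim_equal_getPrev := by
  intro s _
  unfold Spec_getPrev
  exact getPrev_spec' s
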